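-- pv_equiv track=rewrite | github.com/gaelduong/twenty-one | test.py | generate_edges
-- ===== SOURCE A (Python) =====
-- def generate_edges(tuples):
--     edges = []
--     for i in range(len(tuples)):
--         for j in range(i+1, len(tuples)):
--             tup = tuples[i]
--             tup2 = tuples[j]
--             if len([card for card in tup if card in tup2]) > 0:
--                 edges.append((tup,tup2))
--     return edges
-- ===== SOURCE B (Python) =====
-- def generate_edges(tuples):
--     # Inverted index: card -> increasing list of indices of tuples containing it.
--     owners = {}
--     for i, tup in enumerate(tuples):
--         for card in tup:
--             idxs = owners.get(card, [])
--             if not idxs or idxs[-1] != i: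
--                 owners[card] = idxs + [i]
--     pairs = set()
--     for idxs in owners.values():
--         for a in range(len(idxs)):
--             for b in range(a + 1, len(idxs)):
--                 pairs.add((idxs[a], idxs[b]))
--     return [(tuples[i], tuples[j]) for (i, j) in sorted(pairs)]
-- ===== Notes on version B (the rewrite author's own statement) =====
-- stated objective: alternative
-- what changed: Replaces A's scan of all n^2 tuple pairs, each with a quadratic membership intersection test, by an inverted index card->tuple indices: index pairs sharing a card are collected into a set and sorted back into A's (i,j) order.
import Mathlib
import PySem

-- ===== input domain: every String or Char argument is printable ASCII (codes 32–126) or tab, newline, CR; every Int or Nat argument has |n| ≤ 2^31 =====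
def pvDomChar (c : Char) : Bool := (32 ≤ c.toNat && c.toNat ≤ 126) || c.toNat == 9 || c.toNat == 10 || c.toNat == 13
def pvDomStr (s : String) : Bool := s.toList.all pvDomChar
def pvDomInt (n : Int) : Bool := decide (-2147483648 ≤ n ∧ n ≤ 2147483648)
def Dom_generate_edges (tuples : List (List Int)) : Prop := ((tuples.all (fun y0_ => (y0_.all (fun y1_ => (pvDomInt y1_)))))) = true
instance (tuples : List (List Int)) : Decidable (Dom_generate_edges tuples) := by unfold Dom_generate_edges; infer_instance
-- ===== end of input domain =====

-- B replaces A's all-pairs scan with per-pair intersection tests by an inverted index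
-- card -> tuple indices; index pairs sharing a card are collected into a set and sorted
-- back into A's (i, j) order (objective: alternative).

-- ===== PORT A =====
def generate_edges (tuples : List (List Int)) : List (List Int × List Int) :=
  (PySem.List.pyRange 0 (PySem.List.len tuples) 1).foldl (fun edges i =>
    (PySem.List.pyRange (i + 1) (PySem.List.len tuples) 1).foldl (fun edges j =>
      let tup := PySem.List.pyGetD tuples i []
      let tup2 := PySem.List.pyGetD tuples j []
      if 0 < PySem.List.len (tup.filter (fun card => tup2.contains card)) then
        edges ++ [(tup, tup2)]
      else edges) edges) []

-- ===== PORT B =====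
def generate_edges_alt (tuples : List (List Int)) : List (List Int × List Int) :=
  let owners : PySem.Dict Int (List Int) :=
    (PySem.List.enumerate tuples).foldl (fun owners p =>
      p.2.foldl (fun owners card =>
        let idxs := owners.getD card []
        if idxs = [] ∨ PySem.List.pyGetD idxs (-1) 0 ≠ p.1 then
          owners.insert card (idxs ++ [p.1])
        else owners) owners) PySem.Dict.empty
  let pairs : PySem.Set (Int × Int) :=
    owners.values.foldl (fun pairs idxs =>
      (PySem.List.pyRange 0 (PySem.List.len idxs) 1).foldl (fun pairs a =>
        (PySem.List.pyRange (a + 1) (PySem.List.len idxs) 1).foldl (fun pairs b =>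
          PySem.Set.add pairs (PySem.List.pyGetD idxs a 0, PySem.List.pyGetD idxs b 0)) pairs) pairs)
      PySem.Set.empty
  (PySem.List.sorted2 pairs (fun ij => ij.1) (fun ij => ij.2)).map
    (fun ij => (PySem.List.pyGetD tuples ij.1 [], PySem.List.pyGetD tuples ij.2 []))

-- ===== PRECONDITION & SPEC =====
def Spec_generate_edges (tuples : List (List Int)) (out : List (List Int × List Int)) : Prop := out = generate_edges_alt tuples
instance (tuples : List (List Int)) (out : List (List Int × List Int)) : Decidable (Spec_generate_edges tuples out) := by unfold Spec_generate_edges; infer_instance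

-- ===== CLAIM (what is proved, stated in full; the proofs are below) =====
def Claim_equal_generate_edges : Prop := ∀ (tuples : List (List Int)), Dom_generate_edges tuples → Spec_generate_edges tuples (generate_edges tuples)

-- ===== LEMMAS AND PROOFS =====

-- tuples[i] as A reads it
def peT (tuples : List (List Int)) (i : Int) : List Int := PySem.List.pyGetD tuples i []

-- A's if-condition (abbrev so Decidable inference sees through it)
abbrev peCond (tuples : List (List Int)) (i j : Int) : Prop :=
  0 < PySem.List.len ((peT tuples i).filter (fun card => (peT tuples j).contains card))

-- the (i, j) index pairs A emits, in A's order
def peFiltered (tuples : List (List Int)) : List (Int × Int) :=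
  (PySem.List.pyRange 0 (PySem.List.len tuples) 1).flatMap (fun i =>
    ((PySem.List.pyRange (i + 1) (PySem.List.len tuples) 1).filter
      (fun j => decide (peCond tuples i j))).map (fun j => (i, j)))

def peEmit (tuples : List (List Int)) (ij : Int × Int) : List Int × List Int :=
  (peT tuples ij.1, peT tuples ij.2)

-- B's per-card step on the dict
def peStepCard (i : Int) (d : PySem.Dict Int (List Int)) (card : Int) : PySem.Dict Int (List Int) :=
  let idxs := d.getD card []
  if idxs = [] ∨ PySem.List.pyGetD idxs (-1) 0 ≠ i then d.insert card (idxs ++ [i]) else d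

def peOwners (tuples : List (List Int)) : PySem.Dict Int (List Int) :=
  (PySem.List.enumerate tuples).foldl (fun owners p => p.2.foldl (peStepCard p.1) owners)
    PySem.Dict.empty

def pePairs (tuples : List (List Int)) : PySem.Set (Int × Int) :=
  (peOwners tuples).values.foldl (fun pairs idxs =>
    (PySem.List.pyRange 0 (PySem.List.len idxs) 1).foldl (fun pairs a =>
      (PySem.List.pyRange (a + 1) (PySem.List.len idxs) 1).foldl (fun pairs b =>
        PySem.Set.add pairs (PySem.List.pyGetD idxs a 0, PySem.List.pyGetD idxs b 0)) pairs) pairs)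
    PySem.Set.empty

-- the inverted-index row for one card over a suffix enumerated from s
def peFrel (l : List (List Int)) (s : Int) (card : Int) : List Int :=
  ((PySem.List.enumerate l s).filter (fun p => decide (card ∈ p.2))).map (fun p => p.1)

def peF (tuples : List (List Int)) (card : Int) : List Int := peFrel tuples 0 card

lemma peB_eq (tuples : List (List Int)) :
    generate_edges_alt tuples =
      (PySem.List.sorted2 (pePairs tuples) (fun ij => ij.1) (fun ij => ij.2)).map (peEmit tuples) := rfl

lemma peA_eq (tuples : List (List Int)) :
    generate_edges tuples = (peFiltered tuples).map (peEmit tuples) := by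
  unfold generate_edges
  have hinner : ∀ (i : Int) (edges : List (List Int × List Int)),
      (PySem.List.pyRange (i + 1) (PySem.List.len tuples) 1).foldl (fun edges j =>
        let tup := PySem.List.pyGetD tuples i []
        let tup2 := PySem.List.pyGetD tuples j []
        if 0 < PySem.List.len (tup.filter (fun card => tup2.contains card)) then
          edges ++ [(tup, tup2)]
        else edges) edges
      = edges ++ ((PySem.List.pyRange (i + 1) (PySem.List.len tuples) 1).filter
          (fun j => decide (peCond tuples i j))).map (fun j => peEmit tuples (i, j)) := by
    intro i edges
    exact PySem.List.foldl_append_ite (p := fun j => peCond tuples i j)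
      (f := fun j => peEmit tuples (i, j)) _ _
  simp only [hinner]
  rw [PySem.List.foldl_append_eq_flatMap]
  simp [peFiltered, List.map_flatMap, List.map_map, Function.comp_def]

-- inner fold over one tuple's cards
lemma peStepCard_fold (cards : List Int) (i : Int) (g : Int → List Int) (Q : Int → Prop)
    [DecidablePred Q] (d : PySem.Dict Int (List Int))
    (hg : ∀ card x, x ∈ g card → x < i)
    (hd : ∀ card, d.getD card [] = g card ++ (if Q card then [i] else []))
    (hk : d.keys.Nodup)
    (hc : ∀ card, d.contains card = true ↔ d.getD card [] ≠ []) :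
    (∀ card, (cards.foldl (peStepCard i) d).getD card []
        = g card ++ (if Q card ∨ card ∈ cards then [i] else []))
    ∧ (cards.foldl (peStepCard i) d).keys.Nodup
    ∧ (∀ card, (cards.foldl (peStepCard i) d).contains card = true
        ↔ (cards.foldl (peStepCard i) d).getD card [] ≠ []) := by
  induction cards generalizing d Q with
  | nil =>
    refine ⟨fun card => ?_, hk, hc⟩
    simpa using hd card
  | cons c cs ih =>
    rw [List.foldl_cons]
    by_cases hQ : Q c
    · have hstep : peStepCard i d c = d := by
        unfold peStepCard
        rw [hd c, if_pos hQ, if_neg]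
        simp [PySem.List.pyGetD_neg_one_append_singleton]
      rw [hstep]
      obtain ⟨h1, h2, h3⟩ := ih (Q := fun card => Q card ∨ card = c) d
        (fun card => by
          rw [hd card]
          refine congrArg _ (if_congr ?_ rfl rfl)
          constructor
          · exact Or.inl
          · rintro (h | rfl)
            exacts [h, hQ]) hk hc
      refine ⟨fun card => ?_, h2, h3⟩
      rw [h1 card]
      exact congrArg _ (if_congr (by simp [List.mem_cons]; tauto) rfl rfl)
    · have hgetD : d.getD c [] = g c := by rw [hd c, if_neg hQ]; simp
      have hcond : d.getD c [] = [] ∨ PySem.List.pyGetD (d.getD c []) (-1) 0 ≠ i := by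
        rcases eq_or_ne (g c) [] with hnil | hne
        · left; rw [hgetD, hnil]
        · right
          rw [hgetD, PySem.List.pyGetD_neg_one (g c) 0 hne]
          have := hg c _ (List.getLast_mem hne)
          omega
      have hstep : peStepCard i d c = d.insert c (g c ++ [i]) := by
        unfold peStepCard
        rw [if_pos hcond, hgetD]
      rw [hstep]
      have hd' : ∀ card, (d.insert c (g c ++ [i])).getD card []
          = g card ++ (if Q card ∨ card = c then [i] else []) := by
        intro card
        rw [PySem.Dict.getD_insert]
        by_cases hcc : card = c
        · subst hcc
          rw [if_pos rfl, if_pos (Or.inr rfl)]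
        · rw [if_neg hcc, hd card]
          exact congrArg _ (if_congr (by tauto) rfl rfl)
      have hc' : ∀ card, (d.insert c (g c ++ [i])).contains card = true
          ↔ (d.insert c (g c ++ [i])).getD card [] ≠ [] := by
        intro card
        rw [PySem.Dict.contains_insert, PySem.Dict.getD_insert]
        by_cases hcc : card = c
        · subst hcc; simp
        · simp only [Bool.or_eq_true, beq_iff_eq, hcc, false_or]
          exact hc card
      obtain ⟨h1, h2, h3⟩ := ih (Q := fun card => Q card ∨ card = c) _ hd'
        (PySem.Dict.nodup_keys_insert d c _ hk) hc'
      refine ⟨fun card => ?_, h2, h3⟩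
      rw [h1 card]
      exact congrArg _ (if_congr (by simp [List.mem_cons]; tauto) rfl rfl)

-- outer fold over the enumerated tuples
lemma peOwnersFold (l : List (List Int)) (s : Int) (G : Int → List Int)
    (d : PySem.Dict Int (List Int))
    (hG : ∀ card x, x ∈ G card → x < s)
    (hd : ∀ card, d.getD card [] = G card)
    (hk : d.keys.Nodup)
    (hc : ∀ card, d.contains card = true ↔ d.getD card [] ≠ []) :
    (∀ card, ((PySem.List.enumerate l s).foldl (fun d p => p.2.foldl (peStepCard p.1) d) d).getD card []
        = G card ++ peFrel l s card)
    ∧ ((PySem.List.enumerate l s).foldl (fun d p => p.2.foldl (peStepCard p.1) d) d).keys.Nodup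
    ∧ (∀ card, ((PySem.List.enumerate l s).foldl (fun d p => p.2.foldl (peStepCard p.1) d) d).contains card = true
        ↔ ((PySem.List.enumerate l s).foldl (fun d p => p.2.foldl (peStepCard p.1) d) d).getD card [] ≠ []) := by
  induction l generalizing s G d with
  | nil =>
    refine ⟨fun card => ?_, hk, hc⟩
    simp [peFrel, PySem.List.enumerate_nil, hd card]
  | cons t l ih =>
    rw [PySem.List.enumerate_cons, List.foldl_cons]
    obtain ⟨h1, h2, h3⟩ := peStepCard_fold t s G (fun _ => False) d hG (fun card => by simp [hd card]) hk hc
    obtain ⟨H1, H2, H3⟩ := ih (s + 1) (fun card => G card ++ (if card ∈ t then [s] else [])) _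
      (fun card x hx => by
        rcases List.mem_append.mp hx with hx | hx
        · have := hG card x hx; omega
        · rcases Decidable.em (card ∈ t) with hct | hct
          · rw [if_pos hct] at hx; simp at hx; omega
          · rw [if_neg hct] at hx; simp at hx)
      (fun card => by rw [h1 card]; simp) h2 h3
    refine ⟨fun card => ?_, H2, H3⟩
    rw [H1 card, List.append_assoc]
    congr 1
    simp only [peFrel, PySem.List.enumerate_cons, List.filter_cons]
    by_cases hct : card ∈ t
    · simp [hct]
    · simp [hct]

lemma peOwners_getD (tuples : List (List Int)) (card : Int) :
    (peOwners tuples).getD card [] = peF tuples card := by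
  obtain ⟨h1, -, -⟩ := peOwnersFold tuples 0 (fun _ => []) PySem.Dict.empty
    (fun card x hx => by simp at hx)
    (fun card => by simp [PySem.Dict.getD_empty])
    PySem.Dict.nodup_keys_empty
    (fun card => by simp [PySem.Dict.contains_empty, PySem.Dict.getD_empty])
  simpa [peF] using h1 card

lemma peOwners_nodup_keys (tuples : List (List Int)) : (peOwners tuples).keys.Nodup := by
  obtain ⟨-, h2, -⟩ := peOwnersFold tuples 0 (fun _ => []) PySem.Dict.empty
    (fun card x hx => by simp at hx)
    (fun card => by simp [PySem.Dict.getD_empty])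
    PySem.Dict.nodup_keys_empty
    (fun card => by simp [PySem.Dict.contains_empty, PySem.Dict.getD_empty])
  exact h2

lemma peOwners_contains (tuples : List (List Int)) (card : Int) :
    (peOwners tuples).contains card = true ↔ peF tuples card ≠ [] := by
  obtain ⟨-, -, h3⟩ := peOwnersFold tuples 0 (fun _ => []) PySem.Dict.empty
    (fun card x hx => by simp at hx)
    (fun card => by simp [PySem.Dict.getD_empty])
    PySem.Dict.nodup_keys_empty
    (fun card => by simp [PySem.Dict.contains_empty, PySem.Dict.getD_empty])
  rw [← peOwners_getD tuples card]
  exact h3 card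

lemma peOwners_values (tuples : List (List Int)) (idxs : List Int) :
    idxs ∈ (peOwners tuples).values ↔ ∃ card, idxs = peF tuples card ∧ peF tuples card ≠ [] := by
  constructor
  · intro hv
    unfold PySem.Dict.values at hv
    rw [List.mem_map] at hv
    obtain ⟨p, hmem, rfl⟩ := hv
    obtain ⟨k, v⟩ := p
    have hget := PySem.Dict.get?_of_mem_items _ hmem (peOwners_nodup_keys tuples)
    have hcont : (peOwners tuples).contains k = true := by
      unfold PySem.Dict.contains
      rw [List.any_eq_true]
      exact ⟨(k, v), hmem, by simp⟩
    have hne := (peOwners_contains tuples k).mp hcont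
    have hv : v = peF tuples k := by
      rw [← peOwners_getD tuples k, PySem.Dict.getD_eq_get?_getD, hget]; rfl
    exact ⟨k, hv, hne⟩
  · rintro ⟨card, rfl, hne⟩
    have hcont := (peOwners_contains tuples card).mpr hne
    cases hq : (peOwners tuples).get? card with
    | none =>
      rw [PySem.Dict.get?_eq_none_iff_contains] at hq
      rw [hq] at hcont; simp at hcont
    | some v =>
      have hv : v = peF tuples card := by
        have h := peOwners_getD tuples card
        rw [PySem.Dict.getD_eq_get?_getD, hq] at h
        exact h
      unfold PySem.Dict.get? at hq
      obtain ⟨p, hfind⟩ : ∃ p, List.find? (fun p => p.1 == card) (peOwners tuples).items = some p := by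
        cases hf : List.find? (fun p => p.1 == card) (peOwners tuples).items with
        | none => rw [hf] at hq; simp at hq
        | some p => exact ⟨p, rfl⟩
      rw [hfind] at hq
      simp only [Option.map_some, Option.some.injEq] at hq
      have hpmem := List.mem_of_find?_eq_some hfind
      unfold PySem.Dict.values
      rw [List.mem_map]
      exact ⟨p, hpmem, by rw [hq, hv]⟩

lemma peT_natCast (tuples : List (List Int)) (k : Nat) (hk : k < tuples.length) :
    peT tuples (k : Int) = tuples[k] := by
  simp only [peT, PySem.List.pyGetD_natCast]
  rw [List.getD_eq_getElem?_getD, List.getElem?_eq_getElem hk]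
  rfl

lemma peF_mem (tuples : List (List Int)) (card i : Int) :
    i ∈ peF tuples card ↔ 0 ≤ i ∧ i < PySem.List.len tuples ∧ card ∈ peT tuples i := by
  unfold peF peFrel
  rw [List.mem_map]
  constructor
  · rintro ⟨p, hp, rfl⟩
    rw [List.mem_filter] at hp
    obtain ⟨hpe, hc⟩ := hp
    rw [PySem.List.mem_enumerate_iff] at hpe
    obtain ⟨k, hk, rfl⟩ := hpe
    simp only [decide_eq_true_eq] at hc
    refine ⟨by simp, ?_, ?_⟩
    · rw [PySem.List.len_eq]; simp; exact_mod_cast hk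
    · simpa [peT_natCast tuples k hk] using hc
  · rintro ⟨h0, hlt, hmem⟩
    obtain ⟨k, rfl⟩ := Int.eq_ofNat_of_zero_le h0
    rw [PySem.List.len_eq] at hlt
    have hk : k < tuples.length := by exact_mod_cast hlt
    refine ⟨((k : Int), tuples[k]), ?_, rfl⟩
    rw [List.mem_filter]
    refine ⟨PySem.List.mem_enumerate_iff _ _ _ |>.mpr ⟨k, hk, by simp⟩, ?_⟩
    simp only [decide_eq_true_eq]
    rw [peT_natCast tuples k hk] at hmem
    exact hmem

lemma peF_pairwise (tuples : List (List Int)) (card : Int) :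
    (peF tuples card).Pairwise (· < ·) := by
  unfold peF peFrel
  rw [List.pairwise_map]
  exact (PySem.List.pairwise_lt_enumerate tuples 0).filter _

lemma peCond_iff (tuples : List (List Int)) (i j : Int) :
    peCond tuples i j ↔ ∃ card, card ∈ peT tuples i ∧ card ∈ peT tuples j := by
  unfold peCond
  rw [PySem.List.len_eq]
  constructor
  · intro h
    have : ((peT tuples i).filter (fun card => (peT tuples j).contains card)) ≠ [] := by
      intro hnil; rw [hnil] at h; simp at h
    obtain ⟨c, hc⟩ := List.exists_mem_of_ne_nil _ this
    rw [List.mem_filter] at hc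
    exact ⟨c, hc.1, by simpa using hc.2⟩
  · rintro ⟨c, hc1, hc2⟩
    have : c ∈ (peT tuples i).filter (fun card => (peT tuples j).contains card) := by
      rw [List.mem_filter]; exact ⟨hc1, by simpa using hc2⟩
    have := List.length_pos_of_mem this
    exact_mod_cast this

-- generic fold lemmas over a Set accumulator
lemma peMemFoldl {β : Type} (l : List β) (step : PySem.Set (Int × Int) → β → PySem.Set (Int × Int))
    (P : β → Int × Int → Prop) (h : ∀ s b x, x ∈ step s b ↔ x ∈ s ∨ P b x) :
    ∀ s x, x ∈ l.foldl step s ↔ x ∈ s ∨ ∃ b ∈ l, P b x := by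
  induction l with
  | nil => simp
  | cons b l ih => intro s x; rw [List.foldl_cons, ih, h]; simp; tauto

lemma peNodupFoldl {β : Type} (l : List β) (step : PySem.Set (Int × Int) → β → PySem.Set (Int × Int))
    (h : ∀ s b, List.Nodup s → List.Nodup (step s b)) :
    ∀ s, List.Nodup s → List.Nodup (l.foldl step s) := by
  induction l with
  | nil => exact fun s hs => hs
  | cons b l ih => intro s hs; rw [List.foldl_cons]; exact ih _ (h s b hs)

lemma pePairs_nodup (tuples : List (List Int)) : (pePairs tuples).Nodup := by
  unfold pePairs
  refine peNodupFoldl _ _ (fun s idxs hs => ?_) _ List.nodup_nil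
  refine peNodupFoldl _ _ (fun s' a hs' => ?_) _ hs
  refine peNodupFoldl _ _ (fun s'' b hs'' => ?_) _ hs'
  exact PySem.Set.nodup_add _ _ hs''

lemma mem_pePairs (tuples : List (List Int)) (x : Int × Int) :
    x ∈ pePairs tuples ↔
      0 ≤ x.1 ∧ x.1 < x.2 ∧ x.2 < PySem.List.len tuples ∧ peCond tuples x.1 x.2 := by
  have hmem : x ∈ pePairs tuples ↔ ∃ idxs ∈ (peOwners tuples).values,
      ∃ a ∈ PySem.List.pyRange 0 (PySem.List.len idxs) 1,
      ∃ b ∈ PySem.List.pyRange (a + 1) (PySem.List.len idxs) 1,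
      x = (PySem.List.pyGetD idxs a 0, PySem.List.pyGetD idxs b 0) := by
    unfold pePairs
    rw [peMemFoldl _ _ (fun idxs x =>
        ∃ a ∈ PySem.List.pyRange 0 (PySem.List.len idxs) 1,
        ∃ b ∈ PySem.List.pyRange (a + 1) (PySem.List.len idxs) 1,
        x = (PySem.List.pyGetD idxs a 0, PySem.List.pyGetD idxs b 0))
      (fun s idxs y => ?_)]
    · simp [PySem.Set.empty]
    · rw [peMemFoldl _ _ (fun a y =>
          ∃ b ∈ PySem.List.pyRange (a + 1) (PySem.List.len idxs) 1,
          y = (PySem.List.pyGetD idxs a 0, PySem.List.pyGetD idxs b 0))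
        (fun s' a y => ?_)]
      rw [PySem.Set.mem_foldl_add]
  rw [hmem]
  constructor
  · rintro ⟨idxs, hidxs, a, ha, b, hb, rfl⟩
    rw [peOwners_values] at hidxs
    obtain ⟨card, rfl, -⟩ := hidxs
    rw [PySem.List.mem_pyRange_one] at ha hb
    rw [PySem.List.len_eq] at ha hb
    obtain ⟨na, rfl⟩ : ∃ na : Nat, a = (na : Int) := ⟨a.toNat, by omega⟩
    obtain ⟨nb, rfl⟩ : ∃ nb : Nat, b = (nb : Int) := ⟨b.toNat, by omega⟩
    have hna : na < (peF tuples card).length := by omega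
    have hnb : nb < (peF tuples card).length := by omega
    have hga : PySem.List.pyGetD (peF tuples card) (na : Int) 0 = (peF tuples card)[na] := by
      rw [PySem.List.pyGetD_natCast, List.getD_eq_getElem?_getD, List.getElem?_eq_getElem hna]
      rfl
    have hgb : PySem.List.pyGetD (peF tuples card) (nb : Int) 0 = (peF tuples card)[nb] := by
      rw [PySem.List.pyGetD_natCast, List.getD_eq_getElem?_getD, List.getElem?_eq_getElem hnb]
      rfl
    have hlt := (List.pairwise_iff_getElem.mp (peF_pairwise tuples card))
      na nb hna hnb (by omega)
    have hmema := (peF_mem tuples card _).mp (List.getElem_mem hna)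
    have hmemb := (peF_mem tuples card _).mp (List.getElem_mem hnb)
    refine ⟨?_, ?_, ?_, ?_⟩
    · simpa [hga] using hmema.1
    · simp only [hga, hgb]; exact hlt
    · simpa [hgb] using hmemb.2.1
    · rw [peCond_iff]
      exact ⟨card, by simpa [hga] using hmema.2.2, by simpa [hgb] using hmemb.2.2⟩
  · rintro ⟨h0, hlt, hlen, hc⟩
    rw [peCond_iff] at hc
    obtain ⟨card, hc1, hc2⟩ := hc
    have hm1 : x.1 ∈ peF tuples card := (peF_mem _ _ _).mpr ⟨h0, by omega, hc1⟩
    have hm2 : x.2 ∈ peF tuples card := (peF_mem _ _ _).mpr ⟨by omega, hlen, hc2⟩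
    obtain ⟨a, halen, ha⟩ := List.getElem_of_mem hm1
    obtain ⟨b, hblen, hb⟩ := List.getElem_of_mem hm2
    have hpw := List.pairwise_iff_getElem.mp (peF_pairwise tuples card)
    have hab : a < b := by
      rcases Nat.lt_trichotomy b a with h | h | h
      · have := hpw b a hblen halen h
        rw [ha, hb] at this; omega
      · exfalso
        have hq : (peF tuples card)[b]? = (peF tuples card)[a]? := by rw [h]
        rw [List.getElem?_eq_getElem hblen, List.getElem?_eq_getElem halen] at hq
        simp only [Option.some.injEq] at hq
        rw [ha, hb] at hq
        omega
      · exact h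
    refine ⟨peF tuples card,
      (peOwners_values tuples _).mpr ⟨card, rfl, List.ne_nil_of_mem hm1⟩,
      (a : Int), ?_, (b : Int), ?_, ?_⟩
    · rw [PySem.List.mem_pyRange_one, PySem.List.len_eq]; omega
    · rw [PySem.List.mem_pyRange_one, PySem.List.len_eq]; omega
    · have e1 : PySem.List.pyGetD (peF tuples card) ((a : Nat) : Int) 0 = x.1 := by
        rw [PySem.List.pyGetD_natCast, List.getD_eq_getElem?_getD, List.getElem?_eq_getElem halen]
        simpa using ha
      have e2 : PySem.List.pyGetD (peF tuples card) ((b : Nat) : Int) 0 = x.2 := by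
        rw [PySem.List.pyGetD_natCast, List.getD_eq_getElem?_getD, List.getElem?_eq_getElem hblen]
        simpa using hb
      rw [e1, e2]

lemma mem_peFiltered (tuples : List (List Int)) (x : Int × Int) :
    x ∈ peFiltered tuples ↔
      0 ≤ x.1 ∧ x.1 < x.2 ∧ x.2 < PySem.List.len tuples ∧ peCond tuples x.1 x.2 := by
  unfold peFiltered
  rw [List.mem_flatMap]
  constructor
  · rintro ⟨i, hi, hx⟩
    rw [List.mem_map] at hx
    obtain ⟨j, hj, rfl⟩ := hx
    rw [List.mem_filter] at hj
    rw [PySem.List.mem_pyRange_one] at hi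
    have hj1 := PySem.List.mem_pyRange_one.mp hj.1
    have hc := of_decide_eq_true hj.2
    exact ⟨hi.1, by omega, by omega, hc⟩
  · rintro ⟨h0, h1, h2, hc⟩
    refine ⟨x.1, PySem.List.mem_pyRange_one.mpr ⟨h0, by omega⟩, ?_⟩
    rw [List.mem_map]
    refine ⟨x.2, ?_, by simp⟩
    rw [List.mem_filter]
    exact ⟨PySem.List.mem_pyRange_one.mpr ⟨by omega, h2⟩, decide_eq_true hc⟩

lemma peFiltered_pairwise (tuples : List (List Int)) :
    (peFiltered tuples).Pairwise (fun x y => x.1 < y.1 ∨ (x.1 = y.1 ∧ x.2 < y.2)) := by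
  unfold peFiltered
  rw [List.flatMap_def, List.pairwise_flatten]
  constructor
  · intro l hl
    rw [List.mem_map] at hl
    obtain ⟨i, _, rfl⟩ := hl
    rw [List.pairwise_map]
    refine ((PySem.List.pairwise_lt_pyRange_one (a := i + 1)
      (b := PySem.List.len tuples)).filter _).imp ?_
    intro a b hab
    exact Or.inr ⟨rfl, hab⟩
  · rw [List.pairwise_map]
    refine (PySem.List.pairwise_lt_pyRange_one (a := 0)
      (b := PySem.List.len tuples)).imp ?_
    intro i i' hii' x hx y hy
    rw [List.mem_map] at hx hy
    obtain ⟨j, _, rfl⟩ := hx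
    obtain ⟨j', _, rfl⟩ := hy
    exact Or.inl hii'

lemma peFiltered_nodup (tuples : List (List Int)) : (peFiltered tuples).Nodup := by
  have h := peFiltered_pairwise tuples
  exact h.imp (fun {x y} hxy heq => by subst heq; omega)

lemma peSorted2_eq_sorted (xs : List (Int × Int)) :
    PySem.List.sorted2 xs (fun ij => ij.1) (fun ij => ij.2)
      = PySem.List.sorted xs (fun ij => toLex ij) := by
  have hbefore : (fun (a b : Int × Int) =>
        (decide (a.1 < b.1) || (!decide (b.1 < a.1) && decide (a.2 < b.2))))
      = (fun (a b : Int × Int) => decide (toLex a < toLex b)) := by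
    funext a b
    rw [Bool.eq_iff_iff]
    simp only [Bool.or_eq_true, Bool.and_eq_true, Bool.not_eq_true', decide_eq_true_eq,
      decide_eq_false_iff_not, Prod.Lex.lt_iff, ofLex_toLex]
    omega
  simp only [PySem.List.sorted2, PySem.List.sorted, if_neg (by simp : ¬(false = true))]
  rw [hbefore]

lemma peSorted_eq (tuples : List (List Int)) :
    PySem.List.sorted2 (pePairs tuples) (fun ij => ij.1) (fun ij => ij.2) = peFiltered tuples := by
  rw [peSorted2_eq_sorted]
  apply PySem.List.sorted_eq_of_perm_of_pairwise_lt
  · rw [List.perm_ext_iff_of_nodup (peFiltered_nodup tuples) (pePairs_nodup tuples)]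
    intro a; rw [mem_peFiltered, mem_pePairs]
  · have h := peFiltered_pairwise tuples
    exact h.imp (by intro a b hab; rw [Prod.Lex.lt_iff]; simpa using hab)

-- ===== VERDICT (by name: the statement is the Claim_ definition above) =====
theorem generate_edges_spec : Claim_equal_generate_edges := by
  intro tuples _dom
  unfold Spec_generate_edges
  rw [peA_eq, peB_eq, peSorted_eq]
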